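-- pv_equiv track=rewrite | github.com/NuttyLogic/BSBolt | BSBolt/CallMethylation/CallMethylationVector.py | clean_overlap
-- ===== SOURCE A (Python) =====
-- def clean_overlap(methylation_calls):
--     cleaned_calls = []
--     cleaned_pos = []
--     current_pos = -1
--     for meth_call, pos in zip(methylation_calls[0], methylation_calls[1]):
--         if pos > current_pos:
--             cleaned_calls.append(meth_call)
--             cleaned_pos.append(pos)
--             current_pos = pos
--     return [cleaned_calls, cleaned_pos]
-- ===== SOURCE B (Python) =====
-- def clean_overlap(methylation_calls):
--     pairs = list(zip(methylation_calls[0], methylation_calls[1]))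
--     # prefix-maximum table: prev_max[i] = max position seen strictly before index i (seed -1)
--     prev_max = []
--     m = -1
--     for _, pos in pairs:
--         prev_max.append(m)
--         if pos > m:
--             m = pos
--     kept = [cp for cp, pm in zip(pairs, prev_max) if cp[1] > pm]
--     return [[c for c, _ in kept], [p for _, p in kept]]
-- ===== Notes on version B (the rewrite author's own statement) =====
-- stated objective: alternative
-- what changed: B replaces A's single-pass running-max accumulation into two output lists by building a prefix-maximum table of positions first and then filtering the zipped pairs against that table, splitting the kept pairs at the end.
import Mathlib
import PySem

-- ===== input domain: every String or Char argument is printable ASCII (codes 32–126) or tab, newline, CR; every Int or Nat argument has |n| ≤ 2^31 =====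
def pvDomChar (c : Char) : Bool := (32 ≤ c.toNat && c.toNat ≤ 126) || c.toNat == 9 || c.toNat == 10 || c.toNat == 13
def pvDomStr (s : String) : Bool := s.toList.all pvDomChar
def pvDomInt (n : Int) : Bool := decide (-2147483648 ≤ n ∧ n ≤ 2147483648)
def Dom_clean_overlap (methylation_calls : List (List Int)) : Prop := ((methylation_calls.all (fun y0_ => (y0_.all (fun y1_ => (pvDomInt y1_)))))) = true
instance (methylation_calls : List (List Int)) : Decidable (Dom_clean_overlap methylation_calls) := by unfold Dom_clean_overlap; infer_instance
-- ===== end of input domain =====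

-- B builds a prefix-maximum table of positions and then filters the zipped pairs against it,
-- instead of A's inline running-max accumulation; same O(n) cost, different decomposition.

-- ===== PORT A =====
-- A's for-loop over zip(methylation_calls[0], methylation_calls[1]) with accumulators
-- cleaned_calls, cleaned_pos, current_pos; appends ported as xs ++ [x].
def cleanLoopA : List (Int × Int) → List Int → List Int → Int → List Int × List Int
  | [], cc, cp, _ => (cc, cp)
  | (c, p) :: rest, cc, cp, cur =>
    if p > cur then cleanLoopA rest (cc ++ [c]) (cp ++ [p]) p
    else cleanLoopA rest cc cp cur

def clean_overlap (methylation_calls : List (List Int)) : List (List Int) :=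
  match methylation_calls with
  | l0 :: l1 :: _ =>
    let (cc, cp) := cleanLoopA (l0.zip l1) [] [] (-1)
    [cc, cp]
  | _ => [[], []]  -- methylation_calls[0]/[1] raises IndexError in Python; excluded by Pre_

-- ===== PORT B =====
-- prev_max table: prevMax pairs m = list of the running max of positions strictly before each index
def prevMax : List (Int × Int) → Int → List Int
  | [], _ => []
  | (_, p) :: rest, m => m :: prevMax rest (if p > m then p else m)

def clean_overlap_alt (methylation_calls : List (List Int)) : List (List Int) :=
  -- methylation_calls[0]/[1]; getD agrees with Python indexing on Pre_ inputs (length ≥ 2)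
  let pairs := (methylation_calls.getD 0 []).zip (methylation_calls.getD 1 [])
  let kept := (pairs.zip (prevMax pairs (-1))).filter (fun x => x.1.2 > x.2)
  [kept.map (fun x => x.1.1), kept.map (fun x => x.1.2)]

-- ===== PRECONDITION & SPEC =====
-- Pre_ excludes exactly the inputs where A raises IndexError (fewer than two inner lists).
def Pre_clean_overlap (methylation_calls : List (List Int)) : Prop := 2 ≤ methylation_calls.length
instance (methylation_calls : List (List Int)) : Decidable (Pre_clean_overlap methylation_calls) := by unfold Pre_clean_overlap; infer_instance
def pvWitness_clean_overlap : List (List Int) := [[1, 2, 3], [5, 4, 7]]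

def Spec_clean_overlap (methylation_calls : List (List Int)) (out : List (List Int)) : Prop := out = clean_overlap_alt methylation_calls
instance (methylation_calls : List (List Int)) (out : List (List Int)) : Decidable (Spec_clean_overlap methylation_calls out) := by unfold Spec_clean_overlap; infer_instance

-- ===== CLAIM (what is proved, stated in full; the proofs are below) =====
def Claim_equal_clean_overlap : Prop := ∀ (methylation_calls : List (List Int)), Dom_clean_overlap methylation_calls → Pre_clean_overlap methylation_calls → Spec_clean_overlap methylation_calls (clean_overlap methylation_calls)

-- ===== LEMMAS AND PROOFS =====
theorem cleanLoopA_eq (pairs : List (Int × Int)) :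
    ∀ (cc cp : List Int) (m : Int),
      cleanLoopA pairs cc cp m =
        (cc ++ ((pairs.zip (prevMax pairs m)).filter (fun x => x.1.2 > x.2)).map (fun x => x.1.1),
         cp ++ ((pairs.zip (prevMax pairs m)).filter (fun x => x.1.2 > x.2)).map (fun x => x.1.2)) := by
  induction pairs with
  | nil => intro cc cp m; simp [cleanLoopA, prevMax]
  | cons hd rest ih =>
    intro cc cp m
    obtain ⟨c, p⟩ := hd
    by_cases h : p > m
    · simp [cleanLoopA, prevMax, h, ih, List.append_assoc]
    · simp [cleanLoopA, prevMax, h, ih]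

-- ===== VERDICT (by name: the statement is the Claim_ definition above) =====
theorem clean_overlap_spec : Claim_equal_clean_overlap := by
  intro mc _ hpre
  match mc with
  | l0 :: l1 :: _ =>
    simp [Spec_clean_overlap, clean_overlap, clean_overlap_alt, cleanLoopA_eq]
  | [] | [_] => simp [Pre_clean_overlap] at hpre
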